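-- pv_equiv track=rewrite | github.com/YiyanYang0728/MultiCAST_guide_predictor | MultiCAST_guide_predictor.py | kmer_exact_counts
-- ===== SOURCE A (Python) =====
-- from typing import Dict, List
--
-- DNA = set("ACGT")
--
-- def kmer_exact_counts(seq: str, k: int, prefix: str) -> Dict[str, int]:
--     s = str(seq).upper()
--     feats: Dict[str, int] = {}
--     if len(s) < k:
--         return feats
--     for i in range(len(s) - k + 1):
--         kmer = s[i:i+k]
--         if set(kmer) <= DNA:
--             key = f"{prefix}={kmer}"
--             feats[key] = feats.get(key, 0) + 1
--     return feats
-- ===== SOURCE B (Python) =====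
-- DNA = set("ACGT")
--
-- def kmer_exact_counts(seq, k, prefix):
--     # Precompute nxt[i] = index of the first non-ACGT character at or after i
--     # (len(s) if none) with one backward pass; a window starting at i is valid
--     # iff it ends before that index, so no per-window set check is needed.
--     s = str(seq).upper()
--     feats = {}
--     if len(s) < k:
--         return feats
--     n = len(s)
--     nxt = [n] * (n + 1)
--     for i in range(n - 1, -1, -1):
--         nxt[i] = nxt[i + 1] if s[i] in DNA else i
--     for i in range(n - k + 1):
--         if i + k <= nxt[i]:
--             key = prefix + "=" + s[i:i+k]
--             feats[key] = feats.get(key, 0) + 1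
--     return feats
-- ===== Notes on version B (the rewrite author's own statement) =====
-- stated objective: faster
-- what changed: A validates every window by building a character set and testing subset-of-DNA; B makes one backward pass precomputing for each position the index of the next non-ACGT character, then validates each window with a single integer comparison i+k <= nxt[i], so per-window set construction disappears.
-- outside the precondition, e.g. on kmer_exact_counts('A', -1, 'p'): A returns {'p=': 3}, B raises IndexError
import Mathlib
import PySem

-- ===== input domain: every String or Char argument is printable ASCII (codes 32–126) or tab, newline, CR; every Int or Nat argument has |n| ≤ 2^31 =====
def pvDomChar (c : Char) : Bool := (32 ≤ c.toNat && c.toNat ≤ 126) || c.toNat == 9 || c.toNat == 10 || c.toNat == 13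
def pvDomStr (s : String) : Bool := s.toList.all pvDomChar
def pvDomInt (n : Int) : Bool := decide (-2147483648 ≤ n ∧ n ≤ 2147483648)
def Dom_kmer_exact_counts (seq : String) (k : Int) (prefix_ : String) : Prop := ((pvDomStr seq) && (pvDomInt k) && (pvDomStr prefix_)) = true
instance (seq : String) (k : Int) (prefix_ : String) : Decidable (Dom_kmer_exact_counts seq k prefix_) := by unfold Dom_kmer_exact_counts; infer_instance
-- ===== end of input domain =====

-- B replaces A's per-window character-set subset test by one backward pass that
-- precomputes, for every position, the index of the next non-ACGT character;
-- each window is then validated by a single integer comparison, removing the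
-- per-window set construction (measured faster in a timing run).  No argument is mutated.

-- ===== PORT A =====
def dnaChars : List Char := ['A', 'C', 'G', 'T']

def kmer_exact_counts (seq : String) (k : Int) (prefix_ : String) : List (String × Int) :=
  let s := (PySem.Str.upper seq).toList
  let feats : PySem.Dict String Int := PySem.Dict.empty
  if (s.length : Int) < k then feats.items
  else
    ((PySem.List.pyRange 0 ((s.length : Int) - k + 1) 1).foldl (fun d i =>
      let kmer := PySem.List.slice s (some i) (some (i + k))
      if PySem.Set.issubset (PySem.Set.ofList kmer) (PySem.Set.ofList dnaChars) then
        let key := String.ofList (prefix_.toList ++ '=' :: kmer)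
        d.insert key (d.getD key 0 + 1)
      else d) feats).items

-- ===== PORT B =====
-- Python's backward fill `nxt = [n]*(n+1); for i in range(n-1,-1,-1): nxt[i] = nxt[i+1] if s[i] in DNA else i`
-- transcribed as structural recursion from the front: each step builds the already-filled
-- suffix of the array first and prepends its own cell, exactly the backward fill's
-- computation; the base case is the last cell `n` (the accumulated index there equals len(s)).
-- `rest.headD 0` is Python's `nxt[i+1]`; `rest` is never empty so the default is never read.
def nxtFrom : List Char → Int → List Int
  | [], i => [i]
  | c :: t, i =>
      let rest := nxtFrom t (i + 1)
      (if c ∈ PySem.Set.ofList dnaChars then rest.headD 0 else i) :: rest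

def kmer_exact_counts_alt (seq : String) (k : Int) (prefix_ : String) : List (String × Int) :=
  let s := (PySem.Str.upper seq).toList
  let feats : PySem.Dict String Int := PySem.Dict.empty
  if (s.length : Int) < k then feats.items
  else
    let nxt := nxtFrom s 0
    ((PySem.List.pyRange 0 ((s.length : Int) - k + 1) 1).foldl (fun d i =>
      -- `nxt[i]` ported as pyGet?; within Pre_ (0 ≤ k) the index is always in range,
      -- so the `.getD 0` default is never read
      if i + k ≤ (PySem.List.pyGet? nxt i).getD 0 then
        let key := String.ofList (prefix_.toList ++ '=' :: PySem.List.slice s (some i) (some (i + k)))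
        d.insert key (d.getD key 0 + 1)
      else d) feats).items

-- ===== PRECONDITION & SPEC =====
-- Pre_ excludes negative k, on which A's accidental value counts empty slices at
-- start positions past the end of the string while B's natural next-invalid-index
-- lookup runs off its array (Python raises IndexError there).
def Pre_kmer_exact_counts (seq : String) (k : Int) (prefix_ : String) : Prop := 0 ≤ k
instance (seq : String) (k : Int) (prefix_ : String) : Decidable (Pre_kmer_exact_counts seq k prefix_) := by unfold Pre_kmer_exact_counts; infer_instance

def pvWitness_kmer_exact_counts : String × Int × String := ("ACA", 2, "p")

def Spec_kmer_exact_counts (seq : String) (k : Int) (prefix_ : String) (out : List (String × Int)) : Prop := out = kmer_exact_counts_alt seq k prefix_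
instance (seq : String) (k : Int) (prefix_ : String) (out : List (String × Int)) : Decidable (Spec_kmer_exact_counts seq k prefix_ out) := by unfold Spec_kmer_exact_counts; infer_instance

-- ===== CLAIM (what is proved, stated in full; the proofs are below) =====
def Claim_equal_kmer_exact_counts : Prop := ∀ (seq : String) (k : Int) (prefix_ : String), Dom_kmer_exact_counts seq k prefix_ → Pre_kmer_exact_counts seq k prefix_ → Spec_kmer_exact_counts seq k prefix_ (kmer_exact_counts seq k prefix_)

-- ===== LEMMAS AND PROOFS =====

-- Bool form of the DNA-membership test both ports decide
def dnaB (c : Char) : Bool := decide (c ∈ PySem.Set.ofList dnaChars)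

theorem nxtFrom_headD (t : List Char) : ∀ (i : Int),
    (nxtFrom t i).head?.getD 0 = i + ((t.takeWhile dnaB).length : Int) := by
  induction t with
  | nil => intro i; simp [nxtFrom]
  | cons c t ih =>
      intro i
      by_cases hc : c ∈ PySem.Set.ofList dnaChars
      · have hb : dnaB c = true := decide_eq_true hc
        simp only [nxtFrom, List.head?_cons, Option.getD_some, if_pos hc,
          List.takeWhile_cons, hb, if_true, List.length_cons, List.headD_eq_head?_getD,
          ih (i + 1)]
        push_cast
        ring
      · have hb : dnaB c = false := decide_eq_false hc
        simp [nxtFrom, hc, hb]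

theorem nxtFrom_get : ∀ (t : List Char) (i : Int) (m : Nat), m ≤ t.length →
    (nxtFrom t i)[m]? = some (i + m + (((t.drop m).takeWhile dnaB).length : Int)) := by
  intro t
  induction t with
  | nil =>
      intro i m hm
      obtain rfl : m = 0 := Nat.le_zero.mp hm
      simp [nxtFrom]
  | cons c t ih =>
      intro i m hm
      cases m with
      | zero =>
          show ((if c ∈ PySem.Set.ofList dnaChars then (nxtFrom t (i+1)).headD 0 else i) :: nxtFrom t (i+1))[0]? = _
          rw [List.getElem?_cons_zero, List.headD_eq_head?_getD]
          by_cases hc : c ∈ PySem.Set.ofList dnaChars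
          · have hb : dnaB c = true := decide_eq_true hc
            rw [if_pos hc, nxtFrom_headD t (i + 1)]
            simp only [List.drop_zero, List.takeWhile_cons, hb, if_true, List.length_cons]
            congr 1
            push_cast
            ring
          · have hb : dnaB c = false := decide_eq_false hc
            rw [if_neg hc]
            simp [hb]
      | succ m' =>
          show ((if c ∈ PySem.Set.ofList dnaChars then (nxtFrom t (i+1)).headD 0 else i) :: nxtFrom t (i+1))[m'+1]? = _
          rw [List.getElem?_cons_succ, List.drop_succ_cons, ih (i + 1) m' (by simpa using hm)]
          congr 1
          push_cast
          ring

theorem all_take_iff (p : Char → Bool) : ∀ (t : List Char) (j : Nat), j ≤ t.length →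
    ((t.take j).all p = true ↔ j ≤ (t.takeWhile p).length) := by
  intro t
  induction t with
  | nil =>
      intro j hj
      obtain rfl : j = 0 := Nat.le_zero.mp hj
      simp
  | cons c t ih =>
      intro j hj
      cases j with
      | zero => simp
      | succ j' =>
          by_cases hc : p c = true
          · simp [hc, ih j' (by simpa using hj)]
          · simp [hc]

theorem kmer_equal (seq : String) (k : Int) (prefix_ : String) (hk : 0 ≤ k) :
    kmer_exact_counts seq k prefix_ = kmer_exact_counts_alt seq k prefix_ := by
  unfold kmer_exact_counts kmer_exact_counts_alt
  set s : List Char := (PySem.Str.upper seq).toList with hs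
  by_cases hlt : (s.length : Int) < k
  · rw [if_pos hlt, if_pos hlt]
  · rw [if_neg hlt, if_neg hlt]
    refine congrArg PySem.Dict.items (PySem.List.foldl_congr_mem' _ _ _ _ ?_)
    intro i hi d
    obtain ⟨hi0, hilt⟩ := (PySem.List.mem_pyRange_one).mp hi
    obtain ⟨m, rfl⟩ : ∃ m : Nat, i = (m : Int) := ⟨i.toNat, (Int.toNat_of_nonneg hi0).symm⟩
    obtain ⟨kn, rfl⟩ : ∃ kn : Nat, k = (kn : Int) := ⟨k.toNat, (Int.toNat_of_nonneg hk).symm⟩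
    have hmn : m ≤ s.length := by omega
    have hkn : kn ≤ (s.drop m).length := by rw [List.length_drop]; omega
    -- the two validity conditions agree
    refine if_congr ?_ rfl rfl
    rw [PySem.List.pyGet?_natCast, nxtFrom_get s 0 m hmn, PySem.List.slice_natCast_add,
      PySem.Set.issubset_iff]
    constructor
    · intro h
      have hall : ((s.drop m).take kn).all dnaB = true := by
        rw [List.all_eq_true]
        intro x hx
        exact decide_eq_true (h x ((PySem.Set.mem_ofList _ _).mpr hx))
      have := (all_take_iff dnaB (s.drop m) kn hkn).mp hall
      simp only [Option.getD_some]
      omega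
    · intro h
      simp only [Option.getD_some] at h
      have hall := (all_take_iff dnaB (s.drop m) kn hkn).mpr (by omega)
      rw [List.all_eq_true] at hall
      intro x hx
      exact of_decide_eq_true (hall x ((PySem.Set.mem_ofList _ _).mp hx))

-- ===== VERDICT (by name: the statement is the Claim_ definition above) =====
theorem kmer_exact_counts_spec : Claim_equal_kmer_exact_counts := by
  intro seq k prefix_ _ hk
  exact kmer_equal seq k prefix_ hk
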